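-- pv_equiv track=rewrite | github.com/mewehez/algorithmic-python | src/jeux_de_dictionnaires.py | last_char_map
-- ===== SOURCE A (Python) =====
-- def last_char_map(words):
--     """Groups words that have the same last character."""
--     word_map = {}
--     for word in words:
--         char = word[-1]
--         if word_map.get(char) is None:
--             word_map[char] = [word]
--         else:
--             word_map[char].append(word)
--     return word_map
-- ===== SOURCE B (Python) =====
-- def last_char_map(words):
--     """Groups words that have the same last character."""
--     keys = list(dict.fromkeys(w[-1] for w in words))
--     return {c: [w for w in words if w[-1] == c] for c in keys}
-- ===== Notes on version B (the rewrite author's own statement) =====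
-- stated objective: idiomatic
-- what changed: Replaces A's incremental per-word dict insertion (get-then-append loop) with a two-pass form: collect the distinct last characters in first-occurrence order via dict.fromkeys, then build the result with one filtering comprehension per key.
-- outside the precondition, e.g. on last_char_map(['ab', '']): A raises IndexError, B raises IndexError
import Mathlib
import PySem

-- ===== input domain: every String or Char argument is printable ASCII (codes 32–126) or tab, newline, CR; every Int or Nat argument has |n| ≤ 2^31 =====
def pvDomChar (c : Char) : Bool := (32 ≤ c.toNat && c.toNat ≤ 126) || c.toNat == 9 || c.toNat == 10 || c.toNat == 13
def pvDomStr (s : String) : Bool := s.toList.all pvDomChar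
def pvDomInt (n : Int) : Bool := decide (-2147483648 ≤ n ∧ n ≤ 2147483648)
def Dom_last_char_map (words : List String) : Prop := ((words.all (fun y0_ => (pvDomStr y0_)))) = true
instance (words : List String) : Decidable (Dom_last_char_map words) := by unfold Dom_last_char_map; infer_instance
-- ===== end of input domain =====

-- B replaces A's incremental dict-building loop by a two-pass form: ordered distinct
-- last characters first (dict.fromkeys), then one filter per key (objective: idiomatic).

-- word[-1] as the 1-character-string dict key; "" only where Python raises (outside Pre_)
def pvLast (w : String) : String :=
  match PySem.Str.pyGet? w (-1) with
  | some c => String.singleton c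
  | none => ""

-- ===== PORT A =====
def last_char_map (words : List String) : List (String × List String) :=
  (words.foldl (fun word_map word =>
      let char := pvLast word
      match word_map.get? char with
      | none => word_map.insert char [word]
      | some l => word_map.insert char (l ++ [word]))
    PySem.Dict.empty).items

-- ===== PORT B =====
def last_char_map_alt (words : List String) : List (String × List String) :=
  let keys := PySem.List.dedup (words.map pvLast)
  keys.map (fun c => (c, words.filter (fun w => pvLast w == c)))

-- ===== PRECONDITION & SPEC =====
-- Pre_ excludes lists containing the empty string, on which Python A raises IndexError (word[-1]).
def Pre_last_char_map (words : List String) : Prop := ∀ w ∈ words, w ≠ ""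
instance (words : List String) : Decidable (Pre_last_char_map words) := by unfold Pre_last_char_map; infer_instance

def pvWitness_last_char_map : List String := ["ab", "cb", "x"]

def Spec_last_char_map (words : List String) (out : List (String × List String)) : Prop := out = last_char_map_alt words
instance (words : List String) (out : List (String × List String)) : Decidable (Spec_last_char_map words out) := by unfold Spec_last_char_map; infer_instance

-- ===== CLAIM (what is proved, stated in full; the proofs are below) =====
def Claim_equal_last_char_map : Prop := ∀ (words : List String), Dom_last_char_map words → Pre_last_char_map words → Spec_last_char_map words (last_char_map words)

-- ===== LEMMAS AND PROOFS =====

-- A's branch on get? is exactly Dict.modify with default []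
theorem pvStepA_eq_modify (d : PySem.Dict String (List String)) (w : String) :
    (match d.get? (pvLast w) with
     | none => d.insert (pvLast w) [w]
     | some l => d.insert (pvLast w) (l ++ [w])) = d.modify (pvLast w) [] (· ++ [w]) := by
  simp [PySem.Dict.modify, PySem.Dict.getD_eq_get?_getD]
  cases d.get? (pvLast w) <;> simp

-- a dict with distinct keys is its key list paired with its lookups
theorem pvItems_eq_keys_getD (d : PySem.Dict String (List String)) (h : d.keys.Nodup) :
    d.items = d.keys.map (fun k => (k, d.getD k [])) := by
  show d.items = (d.items.map (·.1)).map (fun k => (k, d.getD k []))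
  rw [List.map_map]
  have hpt : ∀ p ∈ d.items, ((fun k => (k, d.getD k [])) ∘ (fun x : String × List String => x.1)) p = p := by
    intro p hp
    have := PySem.Dict.getD_of_mem_items (d := d) (k := p.1) (v := p.2) (d0 := []) (by simpa using hp) h
    simp [this]
  rw [List.map_congr_left hpt]; simp

theorem last_char_map_eq_alt (words : List String) :
    last_char_map words = last_char_map_alt words := by
  unfold last_char_map
  have hstep : (fun (word_map : PySem.Dict String (List String)) (word : String) =>
      let char := pvLast word
      match word_map.get? char with
      | none => word_map.insert char [word]
      | some l => word_map.insert char (l ++ [word]))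
      = fun d w => d.modify (pvLast w) [] (· ++ [w]) := by
    funext d w; exact pvStepA_eq_modify d w
  rw [hstep]
  set D := words.foldl (fun d w => d.modify (pvLast w) [] (· ++ [w])) PySem.Dict.empty with hD
  have hkeys : D.keys = PySem.List.dedup (words.map pvLast) := by
    rw [hD, PySem.Dict.keys_foldl_modify_key]
    simp [PySem.Dict.keys_empty]
    rfl
  have hnodup : D.keys.Nodup := by
    rw [hkeys]; exact PySem.List.nodup_dedup _
  have hval : ∀ c, D.getD c [] = words.filter (fun w => pvLast w == c) := by
    intro c
    have hfm : D = (words.map (fun w => (pvLast w, w))).foldl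
        (fun d p => d.modify p.1 [] (· ++ [p.2])) PySem.Dict.empty := by
      rw [hD, List.foldl_map]
    rw [hfm, PySem.Dict.getD_foldl_modify_append, PySem.Dict.getD_empty]
    rw [List.filter_map, List.map_map]
    simp [Function.comp_def]
  rw [pvItems_eq_keys_getD D hnodup, hkeys]
  unfold last_char_map_alt
  exact List.map_congr_left (fun c _ => by rw [hval c])

-- ===== VERDICT (by name: the statement is the Claim_ definition above) =====
theorem last_char_map_spec : Claim_equal_last_char_map := by
  intro words _ _
  exact last_char_map_eq_alt words
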